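-- pv_equiv track=rewrite | github.com/Miguel-Angel-Salazar/Estructuras_sandra | recursion/taller/4.py | simulacion_juego
-- ===== SOURCE A (Python) =====
-- def simulacion_juego(lista, jug1=0, jug2=0, conturno= 1):
--
--     if len(lista) == 0:
--         return [jug1, jug2]
--
--     if lista[0] >= lista[-1]:
--         num_elegido = lista[0]
--         num_restante = lista[1:]
--
--     else:
--          num_elegido = lista[-1]
--          num_restante = lista[:-1]
--
--     if conturno == 1:
--         return simulacion_juego(num_restante, jug1 + num_elegido, jug2, 2)
--     else:
--         return simulacion_juego(num_restante, jug1, jug2 + num_elegido, 1 )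
-- ===== SOURCE B (Python) =====
-- def simulacion_juego(lista, jug1=0, jug2=0, conturno=1):
--     # Two-pointer iteration over indices: no slicing, no recursion; O(n).
--     i, j = 0, len(lista) - 1
--     s1, s2 = jug1, jug2
--     turn1 = (conturno == 1)
--     while i <= j:
--         if lista[i] >= lista[j]:
--             pick = lista[i]
--             i += 1
--         else:
--             pick = lista[j]
--             j -= 1
--         if turn1:
--             s1 += pick
--         else:
--             s2 += pick
--         turn1 = not turn1
--     return [s1, s2]
-- ===== Notes on version B (the rewrite author's own statement) =====
-- stated objective: faster
-- what changed: Replaces the recursive simulation that copies a slice of the list at every turn with an iterative two-pointer loop over indices that never copies the list.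
import Mathlib
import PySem

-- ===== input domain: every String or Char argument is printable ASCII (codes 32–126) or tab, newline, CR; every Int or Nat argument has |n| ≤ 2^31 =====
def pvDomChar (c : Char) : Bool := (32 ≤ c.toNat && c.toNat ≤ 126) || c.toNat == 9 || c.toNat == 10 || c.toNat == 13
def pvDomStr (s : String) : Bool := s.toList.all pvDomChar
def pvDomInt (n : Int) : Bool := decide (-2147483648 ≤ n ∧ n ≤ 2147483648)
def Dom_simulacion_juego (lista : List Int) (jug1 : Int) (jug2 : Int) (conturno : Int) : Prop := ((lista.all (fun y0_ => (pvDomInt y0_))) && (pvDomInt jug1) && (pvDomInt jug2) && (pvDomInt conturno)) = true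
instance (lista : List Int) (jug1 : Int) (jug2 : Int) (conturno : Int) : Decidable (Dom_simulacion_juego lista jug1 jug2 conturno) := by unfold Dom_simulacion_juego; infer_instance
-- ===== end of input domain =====

-- B replaces A's recursion-with-slicing by an iterative two-pointer loop over indices (faster: O(n) vs O(n^2)).

-- ===== PORT A =====
-- literal transliteration of A: recursive greedy pick from either end, slicing off the chosen element
def simulacion_juego (lista : List Int) (jug1 : Int) (jug2 : Int) (conturno : Int) : List Int :=
  if _h : lista.length = 0 then [jug1, jug2]
  else
    if PySem.List.pyGetD lista 0 0 ≥ PySem.List.pyGetD lista (-1) 0 then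
      -- num_elegido = lista[0]; num_restante = lista[1:]
      let num_elegido := PySem.List.pyGetD lista 0 0
      let num_restante := PySem.List.slice lista (some 1) none
      if conturno = 1 then
        simulacion_juego num_restante (jug1 + num_elegido) jug2 2
      else
        simulacion_juego num_restante jug1 (jug2 + num_elegido) 1
    else
      -- num_elegido = lista[-1]; num_restante = lista[:-1]
      let num_elegido := PySem.List.pyGetD lista (-1) 0
      let num_restante := PySem.List.slice lista none (some (-1))
      if conturno = 1 then
        simulacion_juego num_restante (jug1 + num_elegido) jug2 2
      else
        simulacion_juego num_restante jug1 (jug2 + num_elegido) 1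
termination_by lista.length
decreasing_by
  all_goals simp [PySem.List.slice_from_one, PySem.List.slice_to_neg_one]
  all_goals omega

-- ===== PORT B =====
-- the while loop of Source B: state (i, j, s1, s2, turn1)
def simulacion_juego_alt_go (lista : List Int) (i j s1 s2 : Int) (turn1 : Bool) : List Int :=
  if _h : i ≤ j then
    if PySem.List.pyGetD lista i 0 ≥ PySem.List.pyGetD lista j 0 then
      let pick := PySem.List.pyGetD lista i 0
      simulacion_juego_alt_go lista (i + 1) j
        (if turn1 then s1 + pick else s1) (if turn1 then s2 else s2 + pick) (!turn1)
    else
      let pick := PySem.List.pyGetD lista j 0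
      simulacion_juego_alt_go lista i (j - 1)
        (if turn1 then s1 + pick else s1) (if turn1 then s2 else s2 + pick) (!turn1)
  else [s1, s2]
termination_by (j + 1 - i).toNat
decreasing_by all_goals omega

def simulacion_juego_alt (lista : List Int) (jug1 : Int) (jug2 : Int) (conturno : Int) : List Int :=
  simulacion_juego_alt_go lista 0 ((lista.length : Int) - 1) jug1 jug2 (conturno == 1)

-- ===== PRECONDITION & SPEC =====
def Spec_simulacion_juego (lista : List Int) (jug1 : Int) (jug2 : Int) (conturno : Int) (out : List Int) : Prop := out = simulacion_juego_alt lista jug1 jug2 conturno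
instance (lista : List Int) (jug1 : Int) (jug2 : Int) (conturno : Int) (out : List Int) : Decidable (Spec_simulacion_juego lista jug1 jug2 conturno out) := by unfold Spec_simulacion_juego; infer_instance

-- ===== CLAIM (what is proved, stated in full; the proofs are below) =====
def Claim_equal_simulacion_juego : Prop := ∀ (lista : List Int) (jug1 : Int) (jug2 : Int) (conturno : Int), Dom_simulacion_juego lista jug1 jug2 conturno → Spec_simulacion_juego lista jug1 jug2 conturno (simulacion_juego lista jug1 jug2 conturno)

-- ===== LEMMAS AND PROOFS =====

-- invariant: A running on the segment lista[i..j] equals B's loop with pointers i, j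
lemma simulacion_juego_go_eq (n : Nat) : ∀ (lista : List Int) (i j s1 s2 c : Int),
    0 ≤ i → j < (lista.length : Int) → (j + 1 - i).toNat = n →
    simulacion_juego ((lista.drop i.toNat).take n) s1 s2 c
      = simulacion_juego_alt_go lista i j s1 s2 (c == 1) := by
  induction n with
  | zero =>
    intro lista i j s1 s2 c hi hj hn
    rw [simulacion_juego, simulacion_juego_alt_go]
    rw [dif_pos (by simp), dif_neg (by omega)]
  | succ n ih =>
    intro lista i j s1 s2 c hi hj hn
    have hlen : i.toNat + n + 1 <= lista.length := by omega
    have hA0 : PySem.List.pyGetD ((lista.drop i.toNat).take (n+1)) 0 0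
        = lista[i.toNat]'(by omega) := by
      rw [PySem.List.pyGetD_eq_getElem _ _ (by omega) (by simp; omega)]
      simp [List.getElem_take, List.getElem_drop]
    have hA1 : PySem.List.pyGetD ((lista.drop i.toNat).take (n+1)) (-1) 0
        = lista[i.toNat+n]'(by omega) := by
      rw [PySem.List.pyGetD_neg_one _ _ (by
        intro hc; have := congrArg List.length hc; simp at this; omega)]
      rw [List.getLast_eq_getElem]
      simp only [List.getElem_take, List.getElem_drop]
      congr 1
      simp; omega
    have hB0 : PySem.List.pyGetD lista i 0 = lista[i.toNat]'(by omega) := by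
      rw [PySem.List.pyGetD_eq_getElem _ _ hi (by omega)]
    have hB1 : PySem.List.pyGetD lista j 0 = lista[i.toNat+n]'(by omega) := by
      rw [PySem.List.pyGetD_eq_getElem _ _ (by omega) (by omega)]
      congr 1
      omega
    have htail : ((lista.drop i.toNat).take (n+1)).tail
        = (lista.drop (i+1).toNat).take n := by
      rw [<- List.drop_one, List.drop_take, List.drop_drop]
      have h1 : (i+1).toNat = i.toNat + 1 := by omega
      rw [h1]
      norm_num
    have hdropLast : ((lista.drop i.toNat).take (n+1)).dropLast
        = (lista.drop i.toNat).take n := by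
      rw [List.dropLast_eq_take, List.take_take]
      simp
      omega
    rw [simulacion_juego, simulacion_juego_alt_go]
    rw [dif_neg (by simp; omega), dif_pos (by omega)]
    simp only [PySem.List.slice_from_one, PySem.List.slice_to_neg_one,
      hA0, hA1, hB0, hB1, htail, hdropLast]
    by_cases hcmp : lista[i.toNat]'(by omega) >= lista[i.toNat+n]'(by omega)
    · rw [if_pos hcmp, if_pos hcmp]
      by_cases hc : c = 1
      · rw [if_pos hc]
        simp only [hc]
        simpa using ih lista (i+1) j (s1 + lista[i.toNat]'(by omega)) s2 2
          (by omega) hj (by omega)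
      · rw [if_neg hc]
        have hb : (c == 1) = false := by simpa using hc
        simp only [hb]
        simpa using ih lista (i+1) j s1 (s2 + lista[i.toNat]'(by omega)) 1
          (by omega) hj (by omega)
    · rw [if_neg hcmp, if_neg hcmp]
      by_cases hc : c = 1
      · rw [if_pos hc]
        simp only [hc]
        simpa using ih lista i (j-1) (s1 + lista[i.toNat+n]'(by omega)) s2 2
          hi (by omega) (by omega)
      · rw [if_neg hc]
        have hb : (c == 1) = false := by simpa using hc
        simp only [hb]
        simpa using ih lista i (j-1) s1 (s2 + lista[i.toNat+n]'(by omega)) 1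
          hi (by omega) (by omega)

-- ===== VERDICT (by name: the statement is the Claim_ definition above) =====
theorem simulacion_juego_spec : Claim_equal_simulacion_juego := by
  intro lista jug1 jug2 conturno _
  unfold Spec_simulacion_juego simulacion_juego_alt
  have h := simulacion_juego_go_eq lista.length lista 0 ((lista.length : Int) - 1)
      jug1 jug2 conturno (by omega) (by omega) (by omega)
  simpa using h
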